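-- pv_equiv track=rewrite | github.com/olumolu/consoleAI | ai.py | _question_needs_web_research
-- ===== SOURCE A (Python) =====
-- def _question_needs_web_research(text: str) -> bool:
--     q = (text or "").strip().lower()
--     if not q:
--         return False
--     triggers = (
--         "latest", "current", "today", "recent", "now",
--         "version", "release", "pricing", "price", "cost",
--         "compare", "comparison", "vs ", "versus",
--         "benchmark", "docs", "documentation", "api",
--         "install", "error", "traceback", "issue",
--         "news", "announced", "official",
--     )
--     if any(t in q for t in triggers):
--         return True
--     if q.endswith("?") and len(q.split()) >= 6:
--         return True
--     return False
-- ===== SOURCE B (Python) =====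
-- _TRIGGERS = (
--     "latest", "current", "today", "recent", "now",
--     "version", "release", "pricing", "price", "cost",
--     "compare", "comparison", "vs ", "versus",
--     "benchmark", "docs", "documentation", "api",
--     "install", "error", "traceback", "issue",
--     "news", "announced", "official",
-- )
--
--
-- def _question_needs_web_research(text: str) -> bool:
--     q = (text or "").strip().lower()
--     if not q:
--         return False
--     # one left-to-right pass: at each position test whether some trigger starts there
--     for i in range(len(q)):
--         for t in _TRIGGERS:
--             if q.startswith(t, i):
--                 return True
--     return q.endswith("?") and len(q.split()) >= 6
-- ===== Notes on version B (the rewrite author's own statement) =====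
-- stated objective: alternative
-- what changed: A runs one full substring scan per trigger (any(t in q)); B makes a single left-to-right pass over the text, testing at each position whether any trigger starts there (startswith with an offset), like the automaton pass of a compiled alternation regex.
import Mathlib
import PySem

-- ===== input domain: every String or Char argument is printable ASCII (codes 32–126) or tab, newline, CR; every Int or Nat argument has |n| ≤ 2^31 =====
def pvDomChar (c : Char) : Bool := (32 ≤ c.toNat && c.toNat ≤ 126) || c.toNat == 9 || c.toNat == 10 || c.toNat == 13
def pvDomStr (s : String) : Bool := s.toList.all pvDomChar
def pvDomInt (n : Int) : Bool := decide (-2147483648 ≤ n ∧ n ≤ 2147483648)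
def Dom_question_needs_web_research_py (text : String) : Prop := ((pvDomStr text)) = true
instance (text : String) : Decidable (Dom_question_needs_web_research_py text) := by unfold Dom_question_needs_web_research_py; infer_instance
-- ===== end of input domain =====

-- A scans trigger by trigger ('t in q'); B makes one pass over the text, testing each
-- position for a trigger prefix. Same value everywhere; objective: alternative.

-- ===== PORT A =====
def pvTriggers : List String :=
  ["latest", "current", "today", "recent", "now",
   "version", "release", "pricing", "price", "cost",
   "compare", "comparison", "vs ", "versus",
   "benchmark", "docs", "documentation", "api",
   "install", "error", "traceback", "issue",
   "news", "announced", "official"]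

def question_needs_web_research_py (text : String) : Bool :=
  let q := PySem.Str.lower (PySem.Str.strip text)
  if q = "" then false
  else if pvTriggers.any (fun t => PySem.Str.isIn t q) then true
  else if PySem.Str.endswith q "?" && decide (6 ≤ (PySem.Str.split₀ q).length) then true
  else false

-- ===== PORT B =====
-- one pass: at each suffix (position), does some trigger start here?
def pvScanHit (ts : List (List Char)) : List Char → Bool
  | [] => false
  | c :: rest => ts.any (fun t => PySem.Chars.startswith (c :: rest) t) || pvScanHit ts rest

def question_needs_web_research_py_alt (text : String) : Bool :=
  let q := PySem.Str.lower (PySem.Str.strip text)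
  if q = "" then false
  else if pvScanHit (pvTriggers.map String.toList) q.toList then true
  else PySem.Str.endswith q "?" && decide (6 ≤ (PySem.Str.split₀ q).length)

-- ===== PRECONDITION & SPEC =====
def Spec_question_needs_web_research_py (text : String) (out : Bool) : Prop := out = question_needs_web_research_py_alt text
instance (text : String) (out : Bool) : Decidable (Spec_question_needs_web_research_py text out) := by unfold Spec_question_needs_web_research_py; infer_instance

-- ===== CLAIM (what is proved, stated in full; the proofs are below) =====
def Claim_equal_question_needs_web_research_py : Prop := ∀ (text : String), Dom_question_needs_web_research_py text → Spec_question_needs_web_research_py text (question_needs_web_research_py text)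

-- ===== LEMMAS AND PROOFS =====

lemma pvScanHit_eq_any_isIn (ts : List (List Char)) (h : ∀ t ∈ ts, t ≠ []) :
    ∀ l : List Char, pvScanHit ts l = ts.any (fun t => PySem.Chars.isIn t l) := by
  intro l
  induction l with
  | nil =>
    rw [pvScanHit, eq_comm, List.any_eq_false]
    intro t ht
    rw [Bool.not_eq_true, PySem.Chars.isIn_eq_false_iff]
    intro hinf
    exact h t ht (List.eq_nil_of_infix_nil hinf)
  | cons c rest ih =>
    rw [pvScanHit, ih]
    rw [Bool.eq_iff_iff]
    simp only [Bool.or_eq_true, List.any_eq_true, PySem.Chars.isIn_iff_infix,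
      PySem.Chars.startswith_iff, List.infix_cons_iff]
    constructor
    · rintro (⟨t, ht, hp⟩ | ⟨t, ht, hi⟩)
      · exact ⟨t, ht, Or.inl hp⟩
      · exact ⟨t, ht, Or.inr hi⟩
    · rintro ⟨t, ht, hp | hi⟩
      · exact Or.inl ⟨t, ht, hp⟩
      · exact Or.inr ⟨t, ht, hi⟩

lemma pv_any_isIn (q : String) :
    pvScanHit (pvTriggers.map String.toList) q.toList
      = pvTriggers.any (fun t => PySem.Str.isIn t q) := by
  rw [pvScanHit_eq_any_isIn]
  · simp [List.any_map, Function.comp_def]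
  · intro t ht
    simp only [List.mem_map] at ht
    obtain ⟨s, hs, rfl⟩ := ht
    fin_cases hs <;> decide

-- ===== VERDICT (by name: the statement is the Claim_ definition above) =====
theorem question_needs_web_research_py_spec : Claim_equal_question_needs_web_research_py := by
  intro text _
  unfold Spec_question_needs_web_research_py
  simp only [question_needs_web_research_py, question_needs_web_research_py_alt, pv_any_isIn]
  split_ifs <;> simp_all
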